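-- pv_equiv track=rewrite | github.com/MiguelARuedaC/TallerNo3_FADA | Taller3-FADA/punto2/Punto2.py | encontrar_moda_iterativa
-- ===== SOURCE A (Python) =====
-- def encontrar_moda_iterativa(elementos, frecuencias):
--     moda = []  # Lista para almacenar la moda
--     max_frecuencia = 0  # Variable para realizar un seguimiento de la frecuencia máxima
--
--     # Iterar a través de los elementos únicos
--     for valor in elementos:
--         # Comparar la frecuencia del valor actual con la frecuencia máxima
--         if frecuencias[valor] > max_frecuencia:
--             # Si la frecuencia es mayor, actualizar la moda y la frecuencia máxima
--             moda = [valor]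
--             max_frecuencia = frecuencias[valor]
--         elif frecuencias[valor] == max_frecuencia:
--             # Si la frecuencia es igual a la máxima, agregar el valor a la moda
--             moda.append(valor)
--
--     # Devolver la moda encontrada
--     return moda
-- ===== SOURCE B (Python) =====
-- def encontrar_moda_iterativa(elementos, frecuencias):
--     # Two-pass version: find the max frequency first (floor 0, like A's init),
--     # then filter the elements that attain it, preserving order and duplicates.
--     max_frecuencia = 0
--     for valor in elementos:
--         f = frecuencias[valor]
--         if f > max_frecuencia:
--             max_frecuencia = f
--     return [valor for valor in elementos if frecuencias[valor] == max_frecuencia]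
-- ===== Notes on version B (the rewrite author's own statement) =====
-- stated objective: simpler
-- what changed: Replaces A's single interleaved scan that resets/extends a running mode list with two separate passes: one pass computing the maximum frequency (floor 0), then a list-comprehension filter of the elements attaining it.
import Mathlib
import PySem

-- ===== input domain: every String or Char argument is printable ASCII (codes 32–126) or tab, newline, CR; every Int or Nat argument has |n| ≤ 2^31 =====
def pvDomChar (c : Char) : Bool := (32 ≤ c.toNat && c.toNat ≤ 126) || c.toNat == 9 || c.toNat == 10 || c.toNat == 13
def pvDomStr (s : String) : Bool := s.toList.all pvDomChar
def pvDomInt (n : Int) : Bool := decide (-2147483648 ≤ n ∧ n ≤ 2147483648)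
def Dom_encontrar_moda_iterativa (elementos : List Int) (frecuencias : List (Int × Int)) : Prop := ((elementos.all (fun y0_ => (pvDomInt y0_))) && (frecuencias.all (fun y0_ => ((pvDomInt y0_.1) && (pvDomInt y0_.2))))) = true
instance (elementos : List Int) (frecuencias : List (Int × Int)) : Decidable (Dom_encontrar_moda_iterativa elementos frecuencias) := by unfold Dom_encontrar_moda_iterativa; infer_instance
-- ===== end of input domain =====

-- B replaces A's single interleaved scan (resetting/extending a running mode list) with two separate passes: find the max frequency, then filter the elements attaining it (objective: simpler).
-- ===== PORT A =====
def pvLookup (frecuencias : List (Int × Int)) (v : Int) : Int :=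
  ((frecuencias.find? (fun p => p.1 == v)).map Prod.snd).getD 0

def encontrar_moda_iterativa (elementos : List Int) (frecuencias : List (Int × Int)) : List Int :=
  (elementos.foldl (fun (st : List Int × Int) valor =>
      let f := pvLookup frecuencias valor
      if f > st.2 then ([valor], f)
      else if f = st.2 then (st.1 ++ [valor], st.2)
      else st) ([], 0)).1

-- ===== PORT B =====
def encontrar_moda_iterativa_alt (elementos : List Int) (frecuencias : List (Int × Int)) : List Int :=
  let maxf := elementos.foldl (fun m valor =>
      let f := pvLookup frecuencias valor
      if f > m then f else m) 0
  elementos.filter (fun valor => pvLookup frecuencias valor == maxf)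

-- ===== PRECONDITION & SPEC =====
-- Pre_: Python A raises KeyError when some element of elementos is not a key of frecuencias.
def Pre_encontrar_moda_iterativa (elementos : List Int) (frecuencias : List (Int × Int)) : Prop :=
  ∀ v ∈ elementos, v ∈ frecuencias.map Prod.fst
instance (elementos : List Int) (frecuencias : List (Int × Int)) : Decidable (Pre_encontrar_moda_iterativa elementos frecuencias) := by unfold Pre_encontrar_moda_iterativa; infer_instance
def pvWitness_encontrar_moda_iterativa : List Int × (List (Int × Int)) := ([1, 2, 1], [(1, 2), (2, 1)])

def Spec_encontrar_moda_iterativa (elementos : List Int) (frecuencias : List (Int × Int)) (out : List Int) : Prop := out = encontrar_moda_iterativa_alt elementos frecuencias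
instance (elementos : List Int) (frecuencias : List (Int × Int)) (out : List Int) : Decidable (Spec_encontrar_moda_iterativa elementos frecuencias out) := by unfold Spec_encontrar_moda_iterativa; infer_instance

-- ===== CLAIM (what is proved, stated in full; the proofs are below) =====
def Claim_equal_encontrar_moda_iterativa : Prop := ∀ (elementos : List Int) (frecuencias : List (Int × Int)), Dom_encontrar_moda_iterativa elementos frecuencias → Pre_encontrar_moda_iterativa elementos frecuencias → Spec_encontrar_moda_iterativa elementos frecuencias (encontrar_moda_iterativa elementos frecuencias)

-- ===== LEMMAS AND PROOFS =====


-- max is monotone along the fold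
lemma pv_le_foldmax (freq : Int → Int) : ∀ (xs : List Int) (a : Int),
    a ≤ xs.foldl (fun a v => max a (freq v)) a := by
  intro xs
  induction xs with
  | nil => intro a; exact le_refl a
  | cons x xs ih =>
    intro a
    calc a ≤ max a (freq x) := le_max_left _ _
      _ ≤ _ := ih _

-- characterisation of A's interleaved loop: final state is the running max M and
-- (old moda if nothing exceeded m, else []) ++ the elements attaining M
lemma pv_loopA (freq : Int → Int) : ∀ (xs : List Int) (moda : List Int) (m : Int),
    xs.foldl (fun (st : List Int × Int) valor =>
      let f := freq valor
      if f > st.2 then ([valor], f)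
      else if f = st.2 then (st.1 ++ [valor], st.2)
      else st) (moda, m)
    = ((if xs.foldl (fun a v => max a (freq v)) m = m then moda else []) ++
        xs.filter (fun v => freq v == xs.foldl (fun a v => max a (freq v)) m),
       xs.foldl (fun a v => max a (freq v)) m) := by
  intro xs
  induction xs with
  | nil => intro moda m; simp
  | cons x xs ih =>
    intro moda m
    by_cases h1 : freq x > m
    · have hmax : max m (freq x) = freq x := by omega
      have hM : freq x ≤ xs.foldl (fun a v => max a (freq v)) (freq x) := pv_le_foldmax freq xs _
      simp only [List.foldl_cons, hmax, if_pos h1, ih, List.filter_cons]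
      have hMm : ¬ xs.foldl (fun a v => max a (freq v)) (freq x) = m := by omega
      simp only [if_neg hMm, List.nil_append]
      by_cases h2 : freq x = xs.foldl (fun a v => max a (freq v)) (freq x)
      · have hb : (freq x == xs.foldl (fun a v => max a (freq v)) (freq x)) = true := by
          simpa [beq_iff_eq] using h2
        simp [hb, if_pos h2.symm]
      · have hb : (freq x == xs.foldl (fun a v => max a (freq v)) (freq x)) = false := by
          simpa [beq_iff_eq] using h2
        simp [hb]
        exact fun h => h2 h.symm
    · by_cases h2 : freq x = m
      · have hmax : max m (freq x) = m := by omega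
        simp only [List.foldl_cons, hmax, if_neg h1, if_pos h2, ih, List.filter_cons]
        by_cases h3 : xs.foldl (fun a v => max a (freq v)) m = m
        · simp [h3, h2]
        · have : ¬ freq x = xs.foldl (fun a v => max a (freq v)) m := by omega
          simp [h3, this, beq_iff_eq]
      · have hmax : max m (freq x) = m := by omega
        have hM : m ≤ xs.foldl (fun a v => max a (freq v)) m := pv_le_foldmax freq xs _
        simp only [List.foldl_cons, hmax, if_neg h1, if_neg h2, ih, List.filter_cons]
        have : ¬ freq x = xs.foldl (fun a v => max a (freq v)) m := by omega
        simp [this, beq_iff_eq]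

-- B's max loop is the same fold written with max
lemma pv_maxloop (freq : Int → Int) (xs : List Int) (a : Int) :
    xs.foldl (fun m v => let f := freq v; if f > m then f else m) a
    = xs.foldl (fun a v => max a (freq v)) a := by
  have : (fun (m : Int) v => let f := freq v; if f > m then f else m)
       = (fun a v => max a (freq v)) := by
    funext m v
    simp only []
    split <;> omega
  rw [this]

-- ===== VERDICT (by name: the statement is the Claim_ definition above) =====
theorem encontrar_moda_iterativa_spec : Claim_equal_encontrar_moda_iterativa := by
  intro elementos frecuencias _ _
  unfold Spec_encontrar_moda_iterativa encontrar_moda_iterativa encontrar_moda_iterativa_alt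
  rw [pv_loopA (pvLookup frecuencias) elementos [] 0, pv_maxloop (pvLookup frecuencias) elementos 0]
  simp
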